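-- pv_equiv track=rewrite | github.com/baicai-1145/vllm-GPT-SoVITS | vllm_omni/model_executor/models/gpt_sovits/runtime_lib/GPT_SoVITS/AR/models/t2s_model.py | _prealloc_kv_bucket_label
-- ===== SOURCE A (Python) =====
-- def _prealloc_kv_bucket_label(next_max_kv_len: int) -> str:
--     boundaries = (1024, 2048, 3072, 4096, 5120)
--     lower = 1
--     for upper in boundaries:
--         if next_max_kv_len <= upper:
--             return f"kv_{lower}_{upper}"
--         lower = upper + 1
--     return f"kv_{boundaries[-1] + 1}_plus"
-- ===== SOURCE B (Python) =====
-- def _prealloc_kv_bucket_label(next_max_kv_len: int) -> str: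
--     if next_max_kv_len > 5120:
--         return "kv_5121_plus"
--     k = max(0, -(-next_max_kv_len // 1024) - 1)
--     return f"kv_{1024 * k + 1}_{1024 * (k + 1)}"
-- ===== Notes on version B (the rewrite author's own statement) =====
-- stated objective: simpler
-- what changed: Replaces the linear scan over the boundary tuple with a direct arithmetic bucket index (clamped ceiling division by 1024), eliminating the loop and the threaded lower accumulator.
import Mathlib
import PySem

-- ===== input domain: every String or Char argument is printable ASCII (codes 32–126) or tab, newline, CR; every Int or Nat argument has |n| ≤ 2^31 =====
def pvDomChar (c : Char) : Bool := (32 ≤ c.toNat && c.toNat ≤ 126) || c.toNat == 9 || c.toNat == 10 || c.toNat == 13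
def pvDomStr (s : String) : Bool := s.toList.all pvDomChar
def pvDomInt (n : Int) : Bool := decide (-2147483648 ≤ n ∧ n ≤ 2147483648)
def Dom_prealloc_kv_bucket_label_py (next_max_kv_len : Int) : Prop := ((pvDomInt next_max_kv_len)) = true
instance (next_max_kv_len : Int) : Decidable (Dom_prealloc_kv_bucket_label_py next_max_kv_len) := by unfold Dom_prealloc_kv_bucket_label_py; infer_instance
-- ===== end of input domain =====

-- B computes the bucket by a clamped ceiling division instead of A's scan over the boundary tuple (objective: simpler).
-- ===== PORT A =====
-- loop over the boundaries tuple, threading the 'lower' accumulator; early return on the first upper bound reached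
def pvAloop (next_max_kv_len : Int) (lower : Int) : List Int → String
  | [] => "kv_" ++ PySem.Int.toStr (5120 + 1) ++ "_plus"
  | upper :: rest =>
      if next_max_kv_len ≤ upper then "kv_" ++ PySem.Int.toStr lower ++ "_" ++ PySem.Int.toStr upper
      else pvAloop next_max_kv_len (upper + 1) rest

def prealloc_kv_bucket_label_py (next_max_kv_len : Int) : String :=
  pvAloop next_max_kv_len 1 [1024, 2048, 3072, 4096, 5120]

-- ===== PORT B =====
def prealloc_kv_bucket_label_py_alt (next_max_kv_len : Int) : String :=
  if next_max_kv_len > 5120 then "kv_5121_plus"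
  else
    let k := max 0 (-(PySem.Int.floordiv (-next_max_kv_len) 1024) - 1)
    "kv_" ++ PySem.Int.toStr (1024 * k + 1) ++ "_" ++ PySem.Int.toStr (1024 * (k + 1))

-- ===== PRECONDITION & SPEC =====
def Spec_prealloc_kv_bucket_label_py (next_max_kv_len : Int) (out : String) : Prop := out = prealloc_kv_bucket_label_py_alt next_max_kv_len
instance (next_max_kv_len : Int) (out : String) : Decidable (Spec_prealloc_kv_bucket_label_py next_max_kv_len out) := by unfold Spec_prealloc_kv_bucket_label_py; infer_instance

-- ===== CLAIM (what is proved, stated in full; the proofs are below) =====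
def Claim_equal_prealloc_kv_bucket_label_py : Prop := ∀ (next_max_kv_len : Int), Dom_prealloc_kv_bucket_label_py next_max_kv_len → Spec_prealloc_kv_bucket_label_py next_max_kv_len (prealloc_kv_bucket_label_py next_max_kv_len)

-- ===== LEMMAS AND PROOFS =====

-- ===== VERDICT (by name: the statement is the Claim_ definition above) =====
theorem prealloc_kv_bucket_label_py_spec : Claim_equal_prealloc_kv_bucket_label_py := by
  intro v _
  unfold Spec_prealloc_kv_bucket_label_py prealloc_kv_bucket_label_py prealloc_kv_bucket_label_py_alt
  by_cases h0 : v ≤ 1024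
  · have hk : max 0 (-(-v / 1024) - 1) = 0 := by omega
    simp [pvAloop, h0, hk, show ¬v > 5120 by omega]
  · by_cases h1 : v ≤ 2048
    · have hk : max 0 (-(-v / 1024) - 1) = 1 := by omega
      simp [pvAloop, h0, h1, hk, show ¬v > 5120 by omega]
    · by_cases h2 : v ≤ 3072
      · have hk : max 0 (-(-v / 1024) - 1) = 2 := by omega
        simp [pvAloop, h0, h1, h2, hk, show ¬v > 5120 by omega]
      · by_cases h3 : v ≤ 4096
        · have hk : max 0 (-(-v / 1024) - 1) = 3 := by omega
          simp [pvAloop, h0, h1, h2, h3, hk, show ¬v > 5120 by omega]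
        · by_cases h4 : v ≤ 5120
          · have hk : max 0 (-(-v / 1024) - 1) = 4 := by omega
            simp [pvAloop, h0, h1, h2, h3, h4, hk, show ¬v > 5120 by omega]
          · simp [pvAloop, h0, h1, h2, h3, h4, show v > 5120 by omega]
            rfl
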